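-- pv_equiv track=rewrite | github.com/MilosCicmanec/Testovac-Ksp | uvod/Tlacitka.py | akc6
-- ===== SOURCE A (Python) =====
-- def akc1(string):
--     string = string + "ABD"
--     return string
--
-- def akc2(string):
--     string = string + "ACD"
--     return string
--
-- def akc3(string):
--     string = string + "ACCCCCD"
--     return string
--
-- def akc4(string):
--     string = string + "A"
--     string = akc2(string)
--     string = string + "D"
--     return string
--
-- def akc5(string):
--     string = string + "A"
--     string = akc3(string)
--     string = string + "C"
--     for i in range(5):
--         string = akc1(string)
--     string = string + "D"
--     return string
--
-- def akc6(string):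
--     string = string + "A"
--     string = akc5(string)
--     string = string + "C"
--     string = string + "BBBBB"
--     for i in range(5):
--         string = akc4(string)
--     string = string + "D"
--     return string
-- ===== SOURCE B (Python) =====
-- def akc6(string):
--     return string + "AAACCCCCDCABDABDABDABDABDDCBBBBBAACDDAACDDAACDDAACDDAACDDD"
-- ===== Notes on version B (the rewrite author's own statement) =====
-- stated objective: simpler
-- what changed: Replaced the nested helper calls and two range(5) loops by a single closed-form concatenation of the precomputed constant suffix.
import Mathlib
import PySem

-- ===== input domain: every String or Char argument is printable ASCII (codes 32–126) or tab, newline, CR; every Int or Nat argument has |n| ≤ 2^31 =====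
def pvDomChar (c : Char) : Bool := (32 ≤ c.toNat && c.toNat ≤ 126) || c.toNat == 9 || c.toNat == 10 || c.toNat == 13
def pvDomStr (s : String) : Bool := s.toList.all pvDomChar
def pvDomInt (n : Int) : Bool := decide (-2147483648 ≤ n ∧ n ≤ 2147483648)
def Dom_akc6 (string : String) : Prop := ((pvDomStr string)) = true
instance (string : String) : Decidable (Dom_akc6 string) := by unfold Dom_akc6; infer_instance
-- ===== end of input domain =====

-- B replaces the nested helper calls and the two range(5) loops by one concatenation
-- of the precomputed constant suffix (objective: simpler).

-- ===== PORT A =====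
def akc1 (string : String) : String := string ++ "ABD"
def akc2 (string : String) : String := string ++ "ACD"
def akc3 (string : String) : String := string ++ "ACCCCCD"
def akc4 (string : String) : String :=
  let string := string ++ "A"
  let string := akc2 string
  string ++ "D"
def akc5 (string : String) : String :=
  let string := string ++ "A"
  let string := akc3 string
  let string := string ++ "C"
  let string := (PySem.List.pyRange 0 5 1).foldl (fun s _ => akc1 s) string
  string ++ "D"
def akc6 (string : String) : String :=
  let string := string ++ "A"
  let string := akc5 string
  let string := string ++ "C"
  let string := string ++ "BBBBB"
  let string := (PySem.List.pyRange 0 5 1).foldl (fun s _ => akc4 s) string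
  string ++ "D"

-- ===== PORT B =====
def akc6_alt (string : String) : String :=
  string ++ "AAACCCCCDCABDABDABDABDABDDCBBBBBAACDDAACDDAACDDAACDDAACDDD"

-- ===== PRECONDITION & SPEC =====
def Spec_akc6 (string : String) (out : String) : Prop := out = akc6_alt string
instance (string : String) (out : String) : Decidable (Spec_akc6 string out) := by unfold Spec_akc6; infer_instance

-- ===== CLAIM (what is proved, stated in full; the proofs are below) =====
def Claim_equal_akc6 : Prop := ∀ (string : String), Dom_akc6 string → Spec_akc6 string (akc6 string)

-- ===== LEMMAS AND PROOFS =====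
theorem pyRange05 : PySem.List.pyRange 0 5 1 = [0,1,2,3,4] := by decide

-- ===== VERDICT (by name: the statement is the Claim_ definition above) =====
theorem akc6_spec : Claim_equal_akc6 := by
  intro s _
  show akc6 s = akc6_alt s
  simp only [akc6, akc6_alt, akc5, akc4, akc3, akc2, akc1, pyRange05, List.foldl,
    String.append_assoc]
  rfl
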